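-- pv_equiv track=rewrite | github.com/oleksandr-medviediev/campus_2018_python | Shalimov_homework_2/6.py | process_allergies
-- ===== SOURCE A (Python) =====
-- allergies = {'1': "eggs", '2': "peanuts", '4': "shellfish",
--  '8': "strawberries", '16': "tomatoes", '32': "chocolate", '64': "pollen", '128': "cats"}
--
-- def process_allergies(arg, next_allergen, determined_allergies):
--
--     new_determined_allergies = determined_allergies
--
--     if arg == 0:
--
--         return new_determined_allergies
--
--     elif arg // next_allergen == 1:
--
--         new_determined_allergies.append(allergies.get(str(next_allergen)))
--
--         return process_allergies(arg % next_allergen, next_allergen // 2, determined_allergies)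
--
--     else:
--
--         return process_allergies(arg, next_allergen // 2, determined_allergies)
-- ===== SOURCE B (Python) =====
-- allergies = {'1': "eggs", '2': "peanuts", '4': "shellfish",
--  '8': "strawberries", '16': "tomatoes", '32': "chocolate", '64': "pollen", '128': "cats"}
--
-- def process_allergies(arg, next_allergen, determined_allergies):
--     if arg < 0:
--         raise ValueError("score must be non-negative")
--     for i in range(arg.bit_length() - 1, -1, -1):
--         power = 1 << i
--         if arg & power:
--             name = allergies[str(power)]  # a bit that is not a known allergen -> KeyError
--             if power <= next_allergen:
--                 determined_allergies.append(name)
--     return determined_allergies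
-- ===== Notes on version B (the rewrite author's own statement) =====
-- stated objective: alternative
-- what changed: Replaces A's recursive floor-division/modulo halving of the threshold with a direct non-recursive decomposition of the score into its binary bits (bit_length + bitwise AND), validating the score (non-negative, known allergen bits) and keeping the names within the threshold.
-- outside the precondition, e.g. on process_allergies(5, 5, []): A returns [None], B returns ['shellfish', 'eggs']
import Mathlib
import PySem

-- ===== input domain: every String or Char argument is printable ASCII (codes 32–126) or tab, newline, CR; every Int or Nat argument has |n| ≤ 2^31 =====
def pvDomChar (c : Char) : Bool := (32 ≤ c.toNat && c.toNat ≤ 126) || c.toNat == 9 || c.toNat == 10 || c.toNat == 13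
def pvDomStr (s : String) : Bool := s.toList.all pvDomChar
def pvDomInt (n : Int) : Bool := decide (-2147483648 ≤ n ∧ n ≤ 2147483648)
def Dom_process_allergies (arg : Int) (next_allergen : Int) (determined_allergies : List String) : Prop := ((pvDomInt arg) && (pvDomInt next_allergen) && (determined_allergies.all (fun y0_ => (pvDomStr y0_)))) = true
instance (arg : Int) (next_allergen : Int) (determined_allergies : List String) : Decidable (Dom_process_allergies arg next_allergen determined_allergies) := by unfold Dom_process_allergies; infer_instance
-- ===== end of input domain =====

-- B replaces A's recursive floor-division/modulo halving by a direct non-recursive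
-- decomposition of the score into its binary bits (bit_length + bitwise AND), validating the
-- score and filtering by the threshold. Both A and B mutate determined_allergies in place and
-- return that same list; the equivalence proved here is about the returned value.

-- ===== PORT A =====
-- the module-level dict 'allergies'
def pvAllergies : PySem.Dict String String :=
  PySem.Dict.ofList
    [("1", "eggs"), ("2", "peanuts"), ("4", "shellfish"), ("8", "strawberries"),
     ("16", "tomatoes"), ("32", "chocolate"), ("64", "pollen"), ("128", "cats")]

-- literal port of A's recursion; fuel only makes the recursion total (64 exceeds the
-- ≤ 41 recursion depth of any input admitted by Dom ∧ Pre_, so the fuel-0 branch is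
-- unreachable there).  Python's allergies.get may return None (appended as a non-string) —
-- those inputs are outside Pre_, so the `.getD ""` default is never the value used on
-- admitted inputs.
def processARec (fuel : Nat) (arg next : Int) (acc : List String) : List String :=
  match fuel with
  | 0 => acc
  | fuel + 1 =>
    if arg = 0 then acc
    else if PySem.Int.floordiv arg next = 1 then
      processARec fuel (PySem.Int.mod arg next) (PySem.Int.floordiv next 2)
        (acc ++ [((PySem.Dict.get? pvAllergies (PySem.Int.toStr next)).getD "")])
    else
      processARec fuel arg (PySem.Int.floordiv next 2) acc

def process_allergies (arg : Int) (next_allergen : Int) (determined_allergies : List String) : List String :=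
  processARec 64 arg next_allergen determined_allergies

-- ===== PORT B =====
-- for-loop over range(arg.bit_length()-1, -1, -1); the range only yields i ≥ 0, so `.toNat`
-- on the shift amount is exact.  Where Python B raises (ValueError on a negative score,
-- KeyError — the `.getD ""` default — on a bit that is no table key) the input is outside
-- Pre_, so the value the port returns there is never the one claimed about.
def process_allergies_alt (arg : Int) (next_allergen : Int) (determined_allergies : List String) : List String :=
  if arg < 0 then determined_allergies else
  (PySem.List.pyRange ((PySem.Int.bitLength arg : Int) - 1) (-1) (-1)).foldl
    (fun acc i =>
      if PySem.Int.band arg ((1 : Int) <<< i.toNat) ≠ 0 then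
        if (1 : Int) <<< i.toNat ≤ next_allergen then
          acc ++ [((PySem.Dict.get? pvAllergies (PySem.Int.toStr ((1 : Int) <<< i.toNat))).getD "")]
        else acc
      else acc)
    determined_allergies

-- ===== PRECONDITION & SPEC =====
-- Pre_ is exactly the set of inputs on which Python A returns a list of strings: the score is
-- zero, or it is non-negative with its top binary digit hb a table power (so arg < 256) such
-- that repeatedly halving next_allergen reaches hb (the bound k < bit_length of
-- next_allergen is not a restriction: next // 2^k = hb ≥ 1 already forces 2^k ≤ next < 2^bit_length,
-- so every witnessing k satisfies it; the bound only makes the ∃ decidable by a short enumeration).  Outside Pre_ (within Dom) A raises (ZeroDivisionError once next_allergen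
-- reaches 0 with the score nonzero, or RecursionError for negative thresholds) or appends
-- None — not a string — via allergies.get on a threshold that is no table key.
def Pre_process_allergies (arg : Int) (next_allergen : Int) (determined_allergies : List String) : Prop :=
  0 ≤ arg ∧ (arg = 0 ∨ ∃ hb ∈ ([1, 2, 4, 8, 16, 32, 64, 128] : List Int),
    hb ≤ arg ∧ arg < 2 * hb ∧
      ∃ k < PySem.Int.bitLength next_allergen, PySem.Int.floordiv next_allergen (2 ^ k) = hb)
instance (arg : Int) (next_allergen : Int) (determined_allergies : List String) : Decidable (Pre_process_allergies arg next_allergen determined_allergies) := by unfold Pre_process_allergies; infer_instance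

def pvWitness_process_allergies : Int × Int × List String := (5, 4, ["chocolate"])

def Spec_process_allergies (arg : Int) (next_allergen : Int) (determined_allergies : List String) (out : List String) : Prop := out = process_allergies_alt arg next_allergen determined_allergies
instance (arg : Int) (next_allergen : Int) (determined_allergies : List String) (out : List String) : Decidable (Spec_process_allergies arg next_allergen determined_allergies out) := by unfold Spec_process_allergies; infer_instance

-- ===== CLAIM (what is proved, stated in full; the proofs are below) =====
def Claim_equal_process_allergies : Prop := ∀ (arg : Int) (next_allergen : Int) (determined_allergies : List String), Dom_process_allergies arg next_allergen determined_allergies → Pre_process_allergies arg next_allergen determined_allergies → Spec_process_allergies arg next_allergen determined_allergies (process_allergies arg next_allergen determined_allergies)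

-- ===== LEMMAS AND PROOFS =====

-- proof-side abbreviation for the table powers
def pvPows : List Int := [1, 2, 4, 8, 16, 32, 64, 128]

-- the allergen names of arg's set bits, high to low (what both programs compute)
def bitNames (arg : Int) : List String :=
  ([128, 64, 32, 16, 8, 4, 2, 1] : List Int).foldl
    (fun acc power =>
      if PySem.Int.band arg power ≠ 0 then
        acc ++ [((PySem.Dict.get? pvAllergies (PySem.Int.toStr power)).getD "")]
      else acc)
    []

-- remaining recursion depth of A below a table power hb
def pvD (hb : Int) : Nat :=
  if hb = 128 then 8 else if hb = 64 then 7 else if hb = 32 then 6 else if hb = 16 then 5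
  else if hb = 8 then 4 else if hb = 4 then 3 else if hb = 2 then 2 else 1

-- A's recursion only ever appends to its accumulator
theorem processARec_append (fuel : Nat) : ∀ (arg next : Int) (acc : List String),
    processARec fuel arg next acc = acc ++ processARec fuel arg next [] := by
  induction fuel with
  | zero => intro arg next acc; simp [processARec]
  | succ f ih =>
    intro arg next acc
    simp only [processARec]
    split
    · simp
    · split
      · rw [ih _ _ (acc ++ _), ih _ _ ([] ++ _)]
        simp
      · exact ih _ _ acc

theorem processARec_zero (fuel : Nat) (next : Int) (acc : List String) (h : 1 ≤ fuel) :
    processARec fuel 0 next acc = acc := by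
  cases fuel with
  | zero => omega
  | succ f => simp [processARec]

-- a fold whose step only appends pulls its initial accumulator out front
theorem foldl_pull (f : List String → Int → List String)
    (hf : ∀ acc x, f acc x = acc ++ f [] x) (l : List Int) :
    ∀ acc : List String, l.foldl f acc = acc ++ l.foldl f [] := by
  induction l with
  | nil => intro acc; simp
  | cons x xs ih =>
    intro acc
    simp only [List.foldl]
    rw [hf acc x, ih (acc ++ f [] x), ih (f [] x)]
    simp

-- B's fold only ever appends to its accumulator
theorem alt_append (arg next : Int) (acc : List String) :
    process_allergies_alt arg next acc = acc ++ process_allergies_alt arg next [] := by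
  unfold process_allergies_alt
  by_cases harg : arg < 0
  · simp [harg]
  · simp only [if_neg harg]
    apply foldl_pull
    intro a x
    dsimp only
    split_ifs <;> simp

theorem bitNames_zero : bitNames 0 = [] := by decide

-- every index the loop visits is one of the 8 bit positions (scores below 256)
set_option maxRecDepth 20000 in
theorem pvRangeBits : ∀ a : Nat, a < 256 →
    ∀ i ∈ PySem.List.pyRange ((PySem.Int.bitLength (a : Int) : Int) - 1) (-1) (-1),
      0 ≤ i ∧ i < 8 := by decide

-- a set bit of a score never exceeds the score's top table power
set_option maxRecDepth 40000 in
theorem pvBle : ∀ a : Nat, a < 256 → ∀ hb ∈ pvPows, hb ≤ (a : Int) → (a : Int) < 2 * hb →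
    ∀ j : Nat, j < 8 → PySem.Int.band (a : Int) ((1 : Int) <<< ((j : Nat) : Int)) ≠ 0 →
      (1 : Int) <<< ((j : Nat) : Int) ≤ hb := by decide

-- with the threshold guard dropped, B's loop computes exactly the bit names
set_option maxRecDepth 40000 in
theorem pvAltCore : ∀ a : Nat, a < 256 →
    (PySem.List.pyRange ((PySem.Int.bitLength (a : Int) : Int) - 1) (-1) (-1)).foldl
      (fun acc i =>
        if PySem.Int.band (a : Int) ((1 : Int) <<< i.toNat) ≠ 0 then
          acc ++ [((PySem.Dict.get? pvAllergies (PySem.Int.toStr ((1 : Int) <<< i.toNat))).getD "")]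
        else acc) []
      = bitNames (a : Int) := by decide

-- when the threshold dominates the top bit, B computes exactly the bit names
theorem alt_eq_bitNames (a : Nat) (next hb : Int) (ha : a < 256) (hmem : hb ∈ pvPows)
    (hle : hb ≤ (a : Int)) (hlt : (a : Int) < 2 * hb) (hnext : hb ≤ next) :
    process_allergies_alt (a : Int) next [] = bitNames (a : Int) := by
  unfold process_allergies_alt
  rw [if_neg (not_lt.mpr (Int.natCast_nonneg a)), ← pvAltCore a ha]
  apply PySem.List.foldl_congr_mem'
  intro i hi acc
  obtain ⟨hi0, hi8⟩ := pvRangeBits a ha i hi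
  by_cases hb0 : PySem.Int.band (a : Int) ((1 : Int) <<< ((i.toNat : Nat) : Int)) ≠ 0
  · have hj : i.toNat < 8 := by omega
    have hple : (1 : Int) <<< ((i.toNat : Nat) : Int) ≤ hb := pvBle a ha hb hmem hle hlt i.toNat hj hb0
    rw [if_pos hb0, if_pos hb0, if_pos (le_trans hple hnext)]
  · rw [if_neg hb0, if_neg hb0]

theorem alt_zero (next : Int) (det : List String) : process_allergies_alt 0 next det = det := by
  have h : PySem.List.pyRange ((PySem.Int.bitLength (0 : Int) : Int) - 1) (-1) (-1) = [] := by
    decide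
  unfold process_allergies_alt
  rw [if_neg (by norm_num), h]
  rfl

-- finite facts about the 8 table powers and scores below 256, by evaluation
set_option maxRecDepth 20000 in
theorem pvTop : ∀ a : Nat, a < 256 → 0 < a →
    ∃ hb ∈ pvPows, hb ≤ (a : Int) ∧ (a : Int) < 2 * hb := by decide

set_option maxRecDepth 40000 in
theorem pvSplit : ∀ a : Nat, a < 256 → ∀ hb ∈ pvPows, hb ≤ (a : Int) → (a : Int) < 2 * hb →
    bitNames (a : Int)
      = ((PySem.Dict.get? pvAllergies (PySem.Int.toStr hb)).getD "") :: bitNames ((a : Int) - hb) := by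
  decide

theorem pvChain : ∀ hb ∈ pvPows, ∀ hb' ∈ pvPows, hb' < hb →
    ∃ k' < 8, PySem.Int.floordiv (PySem.Int.floordiv hb 2) (2 ^ k') = hb'
      ∧ k' + pvD hb' + 1 ≤ pvD hb := by decide

theorem pvPowFacts : ∀ hb ∈ pvPows, (1 : Int) ≤ hb ∧ hb ≤ 128 ∧ 1 ≤ pvD hb ∧ pvD hb ≤ 8 := by decide

-- the main invariant: with enough fuel, A's recursion from any threshold whose halving chain
-- reaches arg's top bit hb computes exactly the bit names of arg
theorem pvMain : ∀ fuel : Nat, ∀ (k : Nat) (arg next hb : Int), hb ∈ pvPows →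
    hb ≤ arg → arg < 2 * hb → PySem.Int.floordiv next (2 ^ k) = hb →
    k + pvD hb + 1 ≤ fuel → processARec fuel arg next [] = bitNames arg := by
  intro fuel
  induction fuel with
  | zero => intro k arg next hb _ _ _ _ hf; omega
  | succ f ih =>
    intro k arg next hb hmem hle hlt hdiv hf
    obtain ⟨hb1, hb128, hD1, hD8⟩ := pvPowFacts hb hmem
    have harg0 : arg ≠ 0 := by omega
    have hpk : (0 : Int) < 2 ^ k := by positivity
    obtain ⟨hbr1, hbr2⟩ := (PySem.Int.floordiv_eq_iff_of_pos hpk).mp hdiv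
    have ha0 : 0 ≤ arg := by omega
    obtain ⟨a, rfl⟩ := Int.eq_ofNat_of_zero_le ha0
    have ha256 : a < 256 := by
      have : (a : Int) < 256 := by omega
      exact_mod_cast this
    match k with
    | 0 =>
      have hnext : next = hb := by simpa using hdiv
      subst hnext
      have hq : PySem.Int.floordiv (a : Int) next = 1 := by
        rw [PySem.Int.floordiv_eq_iff_of_pos (by omega : (0:Int) < next)]
        constructor
        · nlinarith
        · nlinarith
      have hmod : PySem.Int.mod (a : Int) next = (a : Int) - next := by
        have h := PySem.Int.floordiv_mul_add_mod (a : Int) next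
        rw [hq] at h; omega
      have hstep : processARec (f + 1) (a : Int) next []
          = processARec f ((a : Int) - next) (PySem.Int.floordiv next 2)
              [((PySem.Dict.get? pvAllergies (PySem.Int.toStr next)).getD "")] := by
        have hna : ¬ (a = 0) := by omega
        simp [processARec, hna, hq, hmod]
      rw [hstep, processARec_append, pvSplit a ha256 next hmem hle hlt]
      simp only [List.singleton_append, List.cons.injEq, true_and]
      by_cases h0 : (a : Int) - next = 0
      · rw [h0, processARec_zero f _ [] (by omega), bitNames_zero]
      · have h0' : 0 < (a : Int) - next := by omega
        obtain ⟨a', ha'⟩ := Int.eq_ofNat_of_zero_le (le_of_lt h0')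
        rw [ha']
        have ha'p : 0 < a' := by exact_mod_cast ha' ▸ h0'
        have ha'256 : a' < 256 := by
          have : ((a' : Int)) < 256 := by rw [← ha']; omega
          exact_mod_cast this
        obtain ⟨hb', hmem', hle', hlt'⟩ := pvTop a' ha'256 ha'p
        have hblt : hb' < next := by
          have h1 : ((a' : Int)) < next := by rw [← ha']; omega
          omega
        obtain ⟨k', _, hdiv', hbound⟩ := pvChain next hmem hb' hmem' hblt
        exact ih k' (a' : Int) (PySem.Int.floordiv next 2) hb' hmem' hle' hlt' hdiv' (by omega)
    | k' + 1 =>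
      have h2k : (2 : Int) ^ (k' + 1) = 2 ^ k' * 2 := pow_succ 2 k'
      have h1k : (1 : Int) ≤ 2 ^ k' := by
        have := pow_pos (show (0:Int) < 2 by norm_num) k'
        omega
      have hnlt : (a : Int) < next := by nlinarith
      have hnpos : (0 : Int) < next := by omega
      have hq0 : PySem.Int.floordiv (a : Int) next = 0 := by
        rw [PySem.Int.floordiv_eq_iff_of_pos hnpos]
        constructor <;> ring_nf <;> omega
      have hstep : processARec (f + 1) (a : Int) next []
          = processARec f (a : Int) (PySem.Int.floordiv next 2) [] := by
        have hna : ¬ (a = 0) := by omega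
        simp [processARec, hna, hq0]
      rw [hstep]
      have hdiv' : PySem.Int.floordiv (PySem.Int.floordiv next 2) (2 ^ k') = hb := by
        rw [PySem.Int.floordiv_eq_ediv_of_pos (by norm_num : (0:Int) < 2),
            PySem.Int.floordiv_eq_ediv_of_pos (by positivity : (0:Int) < 2 ^ k'),
            Int.ediv_ediv_of_nonneg (by norm_num : (0:Int) ≤ 2)]
        rw [← hdiv, PySem.Int.floordiv_eq_ediv_of_pos hpk]
        congr 1
        rw [h2k]; ring
      exact ih k' (a : Int) (PySem.Int.floordiv next 2) hb hmem hle hlt hdiv' (by omega)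

-- ===== VERDICT (by name: the statement is the Claim_ definition above) =====
theorem process_allergies_spec : Claim_equal_process_allergies := by
  intro arg next det hdom hpre
  obtain ⟨ha, hcase⟩ := hpre
  unfold Spec_process_allergies process_allergies
  rcases hcase with h0 | ⟨hb, hmem, hle, hlt, k, hk, hdiv⟩
  · subst h0
    rw [alt_zero, processARec_append, processARec_zero 64 next [] (by omega)]
    simp
  · rw [processARec_append, alt_append]
    have hmem' : hb ∈ pvPows := by unfold pvPows; exact hmem
    obtain ⟨hb1, hb128, hD1, hD8⟩ := pvPowFacts hb hmem'
    obtain ⟨a, rfl⟩ := Int.eq_ofNat_of_zero_le ha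
    have ha256 : a < 256 := by
      have : (a : Int) < 256 := by omega
      exact_mod_cast this
    have hpk : (0 : Int) < 2 ^ k := by positivity
    have h1k : (1 : Int) ≤ 2 ^ k := by
      have := pow_pos (show (0:Int) < 2 by norm_num) k
      omega
    obtain ⟨hbr1, _⟩ := (PySem.Int.floordiv_eq_iff_of_pos hpk).mp hdiv
    -- from Dom, |next| ≤ 2^31, so k < bitLength next ≤ 32 and the fuel 64 suffices
    have hnext31 : -2147483648 ≤ next ∧ next ≤ 2147483648 := by
      have := hdom
      unfold Dom_process_allergies pvDomInt at this
      simp only [Bool.and_eq_true, decide_eq_true_eq] at this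
      exact ⟨this.1.2.1, this.1.2.2⟩
    have habs : next.natAbs ≤ 2147483648 := by omega
    have hnpos : (0 : Int) < next := by nlinarith
    have hL := PySem.Int.two_pow_bitLength_le next (by omega)
    have hk31 : k ≤ 31 := by
      by_contra hgt
      have h32 : (2 : Nat) ^ 32 ≤ 2 ^ (PySem.Int.bitLength next - 1) :=
        Nat.pow_le_pow_right (by norm_num) (by omega)
      have := le_trans h32 hL
      norm_num at this
      omega
    have hble : hb ≤ next := by nlinarith
    congr 1
    rw [pvMain 64 k (a : Int) next hb hmem' hle hlt hdiv (by omega)]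
    rw [alt_eq_bitNames a next hb ha256 hmem' hle hlt hble]
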